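-- pv_equiv track=rewrite | github.com/getsecondbrain/mnemos | backend/app/services/gedcom_import.py | _compute_relationship
-- ===== SOURCE A (Python) =====
-- def _compute_relationship(
--     owner_id: str,
--     target_id: str,
--     parent_of: dict[str, set[str]],
--     child_of: dict[str, set[str]],
--     spouse_of: dict[str, set[str]],
-- ) -> str:
--     """Compute the relationship of target relative to owner.
--
--     Priority order: spouse -> child -> parent -> sibling ->
--     grandparent -> grandchild -> other.
--     """
--     # Spouse
--     if target_id in spouse_of.get(owner_id, set()):
--         return "spouse"
--
--     # Child (owner is parent of target)
--     if target_id in parent_of.get(owner_id, set()):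
--         return "child"
--
--     # Parent (owner is child of target)
--     if target_id in child_of.get(owner_id, set()):
--         return "parent"
--
--     # Sibling (shared parents)
--     owner_parents = child_of.get(owner_id, set())
--     siblings: set[str] = set()
--     for p in owner_parents:
--         siblings |= parent_of.get(p, set())
--     siblings.discard(owner_id)
--     if target_id in siblings:
--         return "sibling"
--
--     # Grandparent (2 hops up)
--     grandparents: set[str] = set()
--     for p in owner_parents:
--         grandparents |= child_of.get(p, set())
--     if target_id in grandparents:
--         return "grandparent"
--
--     # Grandchild (2 hops down)
--     owner_children = parent_of.get(owner_id, set())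
--     grandchildren: set[str] = set()
--     for c in owner_children:
--         grandchildren |= parent_of.get(c, set())
--     if target_id in grandchildren:
--         return "grandchild"
--
--     return "other"
-- ===== SOURCE B (Python) =====
-- def _compute_relationship(
--     owner_id: str,
--     target_id: str,
--     parent_of: dict[str, set[str]],
--     child_of: dict[str, set[str]],
--     spouse_of: dict[str, set[str]],
-- ) -> str:
--     """Classify target relative to owner by inverting the edge maps once
--     and testing set intersections from the TARGET's side, instead of
--     enumerating owner's two-hop neighbourhood and unioning it up."""
--     empty: set[str] = set()
--     if target_id in spouse_of.get(owner_id, empty):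
--         return "spouse"
--     if target_id in parent_of.get(owner_id, empty):
--         return "child"
--     if target_id in child_of.get(owner_id, empty):
--         return "parent"
--     # Inverted indices: who lists target_id among their children / parents?
--     target_parents = {k for k, vs in parent_of.items() if target_id in vs}
--     target_children = {k for k, vs in child_of.items() if target_id in vs}
--     owner_parents = child_of.get(owner_id, empty)
--     if target_id != owner_id and owner_parents & target_parents:
--         return "sibling"
--     if owner_parents & target_children:
--         return "grandparent"
--     if parent_of.get(owner_id, empty) & target_parents:
--         return "grandchild"
--     return "other"
-- ===== Notes on version B (the rewrite author's own statement) =====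
-- stated objective: alternative
-- what changed: Instead of A's forward two-hop enumeration (union up the full sibling/grandparent/grandchild sets around the owner, then test membership), B builds two inverted indices over the whole edge maps (the keys that list target_id as a child / as a parent) and classifies by set intersections from the target's side, with an explicit target_id != owner_id guard replacing A's discard.
import Mathlib
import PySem

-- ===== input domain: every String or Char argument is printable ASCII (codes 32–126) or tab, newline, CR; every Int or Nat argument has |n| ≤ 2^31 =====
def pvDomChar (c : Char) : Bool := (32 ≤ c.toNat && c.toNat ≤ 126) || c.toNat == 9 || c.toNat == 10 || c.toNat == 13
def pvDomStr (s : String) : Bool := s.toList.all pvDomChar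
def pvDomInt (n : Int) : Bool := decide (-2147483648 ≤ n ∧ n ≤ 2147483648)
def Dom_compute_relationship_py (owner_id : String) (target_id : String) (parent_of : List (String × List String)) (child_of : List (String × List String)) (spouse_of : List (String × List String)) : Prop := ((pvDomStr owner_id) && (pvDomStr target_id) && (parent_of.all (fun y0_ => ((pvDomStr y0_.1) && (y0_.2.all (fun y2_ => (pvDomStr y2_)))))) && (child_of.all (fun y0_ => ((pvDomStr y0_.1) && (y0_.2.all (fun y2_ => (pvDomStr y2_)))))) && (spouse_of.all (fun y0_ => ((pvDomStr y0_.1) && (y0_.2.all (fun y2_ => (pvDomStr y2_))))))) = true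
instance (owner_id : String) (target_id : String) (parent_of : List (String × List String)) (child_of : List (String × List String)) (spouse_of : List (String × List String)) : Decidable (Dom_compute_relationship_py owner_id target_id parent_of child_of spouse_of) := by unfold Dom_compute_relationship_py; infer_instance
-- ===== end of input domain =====

-- ===== PORT A =====
-- B inverts the edge maps once and classifies by intersections from the target's side; objective: alternative.
def compute_relationship_py (owner_id : String) (target_id : String) (parent_of : List (String × List String)) (child_of : List (String × List String)) (spouse_of : List (String × List String)) : String :=
  let pd := PySem.Dict.mk parent_of
  let cd := PySem.Dict.mk child_of
  let sd := PySem.Dict.mk spouse_of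
  if (sd.getD owner_id []).contains target_id then "spouse"
  else if (pd.getD owner_id []).contains target_id then "child"
  else if (cd.getD owner_id []).contains target_id then "parent"
  else
    let owner_parents := cd.getD owner_id []
    let siblings := owner_parents.foldl (fun s p => PySem.Set.union s (pd.getD p [])) PySem.Set.empty
    let siblings := PySem.Set.discard siblings owner_id
    if siblings.contains target_id then "sibling"
    else
      let grandparents := owner_parents.foldl (fun s p => PySem.Set.union s (cd.getD p [])) PySem.Set.empty
      if grandparents.contains target_id then "grandparent"
      else
        let owner_children := pd.getD owner_id []
        let grandchildren := owner_children.foldl (fun s c => PySem.Set.union s (pd.getD c [])) PySem.Set.empty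
        if grandchildren.contains target_id then "grandchild"
        else "other"

-- ===== PORT B =====
def compute_relationship_py_alt (owner_id : String) (target_id : String) (parent_of : List (String × List String)) (child_of : List (String × List String)) (spouse_of : List (String × List String)) : String :=
  let pd := PySem.Dict.mk parent_of
  let cd := PySem.Dict.mk child_of
  let sd := PySem.Dict.mk spouse_of
  if (sd.getD owner_id []).contains target_id then "spouse"
  else if (pd.getD owner_id []).contains target_id then "child"
  else if (cd.getD owner_id []).contains target_id then "parent"
  else
    -- inverted indices: keys whose value set lists target_id
    let target_parents := PySem.Set.ofList ((pd.items.filter (fun kv => kv.2.contains target_id)).map Prod.fst)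
    let target_children := PySem.Set.ofList ((cd.items.filter (fun kv => kv.2.contains target_id)).map Prod.fst)
    let owner_parents := cd.getD owner_id []
    if target_id != owner_id && !(PySem.Set.inter owner_parents target_parents).isEmpty then "sibling"
    else if !(PySem.Set.inter owner_parents target_children).isEmpty then "grandparent"
    else if !(PySem.Set.inter (pd.getD owner_id []) target_parents).isEmpty then "grandchild"
    else "other"

-- ===== PRECONDITION & SPEC =====
-- Pre_ requires the association lists standing for parent_of and child_of to have
-- distinct keys: a Python dict always does, so no input drawn from a real dict is excluded.
def Pre_compute_relationship_py (owner_id : String) (target_id : String) (parent_of : List (String × List String)) (child_of : List (String × List String)) (spouse_of : List (String × List String)) : Prop :=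
  (parent_of.map Prod.fst).Nodup ∧ (child_of.map Prod.fst).Nodup
instance (owner_id : String) (target_id : String) (parent_of : List (String × List String)) (child_of : List (String × List String)) (spouse_of : List (String × List String)) : Decidable (Pre_compute_relationship_py owner_id target_id parent_of child_of spouse_of) := by unfold Pre_compute_relationship_py; infer_instance
def pvWitness_compute_relationship_py : String × String × (List (String × List String)) × (List (String × List String)) × (List (String × List String)) :=
  ("a", "b", [("p", ["a", "b"])], [("a", ["p"]), ("b", ["p"])], [])
def Spec_compute_relationship_py (owner_id : String) (target_id : String) (parent_of : List (String × List String)) (child_of : List (String × List String)) (spouse_of : List (String × List String)) (out : String) : Prop := out = compute_relationship_py_alt owner_id target_id parent_of child_of spouse_of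
instance (owner_id : String) (target_id : String) (parent_of : List (String × List String)) (child_of : List (String × List String)) (spouse_of : List (String × List String)) (out : String) : Decidable (Spec_compute_relationship_py owner_id target_id parent_of child_of spouse_of out) := by unfold Spec_compute_relationship_py; infer_instance

-- ===== CLAIM (what is proved, stated in full; the proofs are below) =====
def Claim_equal_compute_relationship_py : Prop := ∀ (owner_id : String) (target_id : String) (parent_of : List (String × List String)) (child_of : List (String × List String)) (spouse_of : List (String × List String)), Dom_compute_relationship_py owner_id target_id parent_of child_of spouse_of → Pre_compute_relationship_py owner_id target_id parent_of child_of spouse_of → Spec_compute_relationship_py owner_id target_id parent_of child_of spouse_of (compute_relationship_py owner_id target_id parent_of child_of spouse_of)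

-- ===== LEMMAS AND PROOFS =====

lemma mem_foldl_union {α β : Type} [BEq α] [LawfulBEq α] (l : List β) (f : β → List α) (s : List α) (x : α) :
    x ∈ l.foldl (fun s p => PySem.Set.union s (f p)) s ↔ x ∈ s ∨ ∃ p ∈ l, x ∈ f p := by
  induction l generalizing s with
  | nil => simp [List.foldl]
  | cons h t ih => simp [List.foldl, ih, PySem.Set.mem_union, or_assoc]

-- with distinct keys, target ∈ d.getD p [] iff p is in the inverted index of d at target
lemma getD_contains_iff_mem_listing (d : PySem.Dict String (List String))
    (hnd : (d.items.map Prod.fst).Nodup) (p t : String) :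
    t ∈ d.getD p [] ↔ p ∈ (d.items.filter (fun kv => kv.2.contains t)).map Prod.fst := by
  have hk : d.keys.Nodup := hnd
  constructor
  · intro h
    rcases hv : d.get? p with _ | v
    · simp [PySem.Dict.getD_eq_get?_getD, hv] at h
    · have hmem : (p, v) ∈ d.items := PySem.Dict.mem_items_of_get?_eq_some d hv
      have : t ∈ v := by simpa [PySem.Dict.getD_eq_get?_getD, hv] using h
      simp only [List.mem_map, List.mem_filter]
      exact ⟨(p, v), ⟨hmem, by simpa using this⟩, rfl⟩
  · intro h
    simp only [List.mem_map, List.mem_filter] at h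
    rcases h with ⟨⟨k, v⟩, ⟨hmem, hc⟩, hfst⟩
    cases hfst
    have := PySem.Dict.getD_of_mem_items d hmem hk []
    simpa [this] using hc

-- nonempty intersection with the inverted index = existential two-hop test
lemma inter_listing_ne_empty (d : PySem.Dict String (List String))
    (hnd : (d.items.map Prod.fst).Nodup) (a : List String) (t : String) :
    ((PySem.Set.inter a (PySem.Set.ofList ((d.items.filter (fun kv => kv.2.contains t)).map Prod.fst))).isEmpty = false)
      ↔ ∃ p ∈ a, t ∈ d.getD p [] := by
  rw [List.isEmpty_eq_false_iff_exists_mem]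
  constructor
  · rintro ⟨x, hx⟩
    rw [PySem.Set.mem_inter _ _ _] at hx
    rcases hx with ⟨hxa, hxl⟩
    rw [PySem.Set.mem_ofList _ _] at hxl
    exact ⟨x, hxa, (getD_contains_iff_mem_listing d hnd x t).2 hxl⟩
  · rintro ⟨p, hpa, hpt⟩
    exact ⟨p, (PySem.Set.mem_inter _ _ _).2 ⟨hpa, (PySem.Set.mem_ofList _ _).2
      ((getD_contains_iff_mem_listing d hnd p t).1 hpt)⟩⟩

-- ===== VERDICT (by name: the statement is the Claim_ definition above) =====
theorem compute_relationship_py_spec : Claim_equal_compute_relationship_py := by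
  intro owner_id target_id parent_of child_of spouse_of _ hpre
  rcases hpre with ⟨hp, hc⟩
  unfold Spec_compute_relationship_py compute_relationship_py compute_relationship_py_alt
  have hpk : ((PySem.Dict.mk parent_of).items.map Prod.fst).Nodup := hp
  have hck : ((PySem.Dict.mk child_of).items.map Prod.fst).Nodup := hc
  simp only []
  -- reduce every branch condition on both sides to the same existential and compare
  have sib : ∀ (a : List String),
      (PySem.Set.discard (a.foldl (fun s p => PySem.Set.union s ((PySem.Dict.mk parent_of).getD p [])) PySem.Set.empty) owner_id).contains target_id
        = (target_id != owner_id && !(PySem.Set.inter a (PySem.Set.ofList (((PySem.Dict.mk parent_of).items.filter (fun kv => kv.2.contains target_id)).map Prod.fst))).isEmpty) := by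
    intro a
    rw [Bool.eq_iff_iff]
    simp only [PySem.Set.contains_iff, PySem.Set.mem_discard, mem_foldl_union,
      Bool.and_eq_true, bne_iff_ne, Bool.not_eq_true', ne_eq,
      inter_listing_ne_empty (PySem.Dict.mk parent_of) hpk a target_id]
    constructor
    · rintro ⟨h1, h2⟩
      exact ⟨h2, by simpa [PySem.Set.empty] using h1⟩
    · rintro ⟨h2, h1⟩
      exact ⟨Or.inr h1, h2⟩
  have gp : ∀ (a : List String),
      (a.foldl (fun s p => PySem.Set.union s ((PySem.Dict.mk child_of).getD p [])) PySem.Set.empty).contains target_id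
        = !(PySem.Set.inter a (PySem.Set.ofList (((PySem.Dict.mk child_of).items.filter (fun kv => kv.2.contains target_id)).map Prod.fst))).isEmpty := by
    intro a
    rw [Bool.eq_iff_iff, Bool.not_eq_true',
      inter_listing_ne_empty (PySem.Dict.mk child_of) hck a target_id]
    simp [PySem.Set.contains_iff, mem_foldl_union, PySem.Set.empty]
  have gc : ∀ (a : List String),
      (a.foldl (fun s p => PySem.Set.union s ((PySem.Dict.mk parent_of).getD p [])) PySem.Set.empty).contains target_id
        = !(PySem.Set.inter a (PySem.Set.ofList (((PySem.Dict.mk parent_of).items.filter (fun kv => kv.2.contains target_id)).map Prod.fst))).isEmpty := by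
    intro a
    rw [Bool.eq_iff_iff, Bool.not_eq_true',
      inter_listing_ne_empty (PySem.Dict.mk parent_of) hpk a target_id]
    simp [PySem.Set.contains_iff, mem_foldl_union, PySem.Set.empty]
  rw [sib, gp, gc]
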